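-- pv_equiv track=rewrite | github.com/vladalexeev/im-possible | im-possible/src/common/customfilters.py | splitlongwords
-- ===== SOURCE A (Python) =====
-- def splitlongwords(x,word_length=50):
--     """Фильтр разбивает слова в строке пробелами,
--     если они по длине больше чем word_length"""
--     last_space_index=0
--     result=''
--     in_tag=False
--
--     for i in range(0,len(x)):
--         c=x[i]
--         if not in_tag:
--             if c=='<':
--                 in_tag=True
--             elif c==' ' or c=='\n' or c=='\r' or c=='\t':
--                 last_space_index=i
--             else:
--                 if i-last_space_index > word_length:
--                     result+=' '
--                     last_space_index=i
--         elif c=='>':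
--             in_tag=False
--             last_space_index=i
--
--         result+=c
--
--     return result
-- ===== SOURCE B (Python) =====
-- def _split_chunk(chunk, start, base, wl):
--     # Emit runs of chunk in slices, splicing in a space whenever the distance
--     # since the last whitespace (tracked as absolute index 'base') exceeds wl.
--     parts = []
--     j = 0
--     for k in range(len(chunk)):
--         c = chunk[k]
--         if c == ' ' or c == '\n' or c == '\r' or c == '\t':
--             base = start + k
--         elif (start + k) - base > wl:
--             parts.append(chunk[j:k])
--             parts.append(' ')
--             j = k
--             base = start + k
--     parts.append(chunk[j:])
--     return ''.join(parts), base
--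
-- def splitlongwords(x, word_length=50):
--     # Tokenize into alternating text chunks and <...> tags; tags pass verbatim,
--     # text chunks get long-word splitting with the absolute offset threaded.
--     out = []
--     base = 0
--     pos = 0
--     n = len(x)
--     while pos < n:
--         lt = x.find('<', pos)
--         if lt < 0:
--             lt = n
--         piece, base = _split_chunk(x[pos:lt], pos, base, word_length)
--         out.append(piece)
--         if lt >= n:
--             break
--         gt = x.find('>', lt + 1)
--         if gt < 0:
--             out.append(x[lt:])  # unterminated tag: rest is literal
--             break
--         out.append(x[lt:gt + 1])
--         base = gt
--         pos = gt + 1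
--     return ''.join(out)
-- ===== Notes on version B (the rewrite author's own statement) =====
-- stated objective: alternative
-- what changed: Replaces A's single per-character state machine (in_tag flag, space counter) by a tokenizer: the string is cut into alternating text chunks and <...> tags via find, tags are copied verbatim as whole slices, and each text chunk is long-word-split by emitting batched slices with the absolute offset threaded across chunks.
import Mathlib
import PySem

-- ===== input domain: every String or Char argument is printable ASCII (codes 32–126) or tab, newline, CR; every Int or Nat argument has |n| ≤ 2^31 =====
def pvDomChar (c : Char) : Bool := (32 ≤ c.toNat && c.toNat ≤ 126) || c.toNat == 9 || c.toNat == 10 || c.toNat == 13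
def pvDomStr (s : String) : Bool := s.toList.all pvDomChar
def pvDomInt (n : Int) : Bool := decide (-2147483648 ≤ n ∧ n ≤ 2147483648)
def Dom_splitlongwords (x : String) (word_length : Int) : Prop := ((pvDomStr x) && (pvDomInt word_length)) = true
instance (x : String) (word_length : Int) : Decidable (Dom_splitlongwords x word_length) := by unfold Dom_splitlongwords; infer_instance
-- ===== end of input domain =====

-- B re-decomposes A's per-character in_tag state machine as a tokenizer: text chunks
-- between tags are long-word-split in batched slices, <...> tags are copied verbatim
-- (objective: alternative decomposition; same asymptotic cost).

def pvIsWs (c : Char) : Bool := c == ' ' || c == '\n' || c == '\r' || c == '\t'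

-- ===== PORT A =====
-- A's for-loop over indices, state (last_space_index, in_tag); result built as emitted.
def aGo (wl : Int) : List Char → Int → Int → Bool → List Char
  | [], _, _, _ => []
  | c :: rest, i, base, inTag =>
    if inTag = false then
      if c = '<' then c :: aGo wl rest (i + 1) base true
      else if pvIsWs c then c :: aGo wl rest (i + 1) i false
      else if i - base > wl then ' ' :: c :: aGo wl rest (i + 1) i false
      else c :: aGo wl rest (i + 1) base false
    else if c = '>' then c :: aGo wl rest (i + 1) i false
    else c :: aGo wl rest (i + 1) base true

def splitlongwords (x : String) (word_length : Int) : String :=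
  String.ofList (aGo word_length x.toList 0 0 false)

-- ===== PORT B =====
-- _split_chunk's for loop: k = current index, j = start of the pending slice,
-- base = absolute index of the last whitespace / split point; slices emitted as reached.
def chunkGo (wl start : Int) (chunk : List Char) : List Char → Nat → Nat → Int → (List Char × Int)
  | [], _, j, base => (chunk.drop j, base)
  | c :: rem, k, j, base =>
    if pvIsWs c then chunkGo wl start chunk rem (k + 1) j (start + k)
    else if start + (k : Int) - base > wl then
      let r := chunkGo wl start chunk rem (k + 1) k (start + (k : Int))
      ((chunk.drop j).take (k - j) ++ ' ' :: r.1, r.2)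
    else chunkGo wl start chunk rem (k + 1) j base

def chunkSplit (chunk : List Char) (start base wl : Int) : List Char × Int :=
  chunkGo wl start chunk chunk 0 0 base

-- the while loop: find the next '<' (none ⇒ one final text chunk), split the text
-- before it, then find the matching '>' (none ⇒ rest verbatim) and recurse after it.
def altGo (wl : Int) (cs : List Char) (start base : Int) : List Char :=
  match h : cs.findIdx? (· = '<') with
  | none => (chunkSplit cs start base wl).1
  | some lt =>
    let p := chunkSplit (cs.take lt) start base wl
    let rest := cs.drop (lt + 1)
    match rest.findIdx? (· = '>') with
    | none => p.1 ++ cs.drop lt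
    | some g =>
      p.1 ++ ('<' :: rest.take (g + 1)) ++
        altGo wl (rest.drop (g + 1)) (start + lt + g + 2) (start + lt + g + 1)
termination_by cs.length
decreasing_by
  · have hlt : lt < cs.length := (List.findIdx?_eq_some_iff_findIdx_eq.mp h).1
    simp only [List.length_drop]
    omega

def splitlongwords_alt (x : String) (word_length : Int) : String :=
  String.ofList (altGo word_length x.toList 0 0)

-- ===== PRECONDITION & SPEC =====
def Spec_splitlongwords (x : String) (word_length : Int) (out : String) : Prop := out = splitlongwords_alt x word_length
instance (x : String) (word_length : Int) (out : String) : Decidable (Spec_splitlongwords x word_length out) := by unfold Spec_splitlongwords; infer_instance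

-- ===== CLAIM (what is proved, stated in full; the proofs are below) =====
def Claim_equal_splitlongwords : Prop := ∀ (x : String) (word_length : Int), Dom_splitlongwords x word_length → Spec_splitlongwords x word_length (splitlongwords x word_length)

-- ===== LEMMAS AND PROOFS =====

-- spec-level per-character text splitter (proof device relating the two ports)
def sGo (wl : Int) : List Char → Int → Int → List Char × Int
  | [], _, base => ([], base)
  | c :: rest, i, base =>
    if pvIsWs c then
      let r := sGo wl rest (i + 1) i
      (c :: r.1, r.2)
    else if i - base > wl then
      let r := sGo wl rest (i + 1) i
      (' ' :: c :: r.1, r.2)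
    else
      let r := sGo wl rest (i + 1) base
      (c :: r.1, r.2)

theorem take_succ_of_drop {chunk : List Char} {k j : Nat} {c : Char} {rem : List Char}
    (hj : j ≤ k) (hd : chunk.drop k = c :: rem) :
    (chunk.drop j).take (k + 1 - j) = (chunk.drop j).take (k - j) ++ [c] := by
  have hk : k < chunk.length := by
    by_contra hk
    have : chunk.drop k = [] := List.drop_eq_nil_iff.mpr (by omega)
    simp [this] at hd
  have hget : chunk[k] = c := by
    have h2 := List.drop_eq_getElem_cons hk
    rw [hd] at h2
    exact (List.cons.injEq _ _ _ _ ▸ h2).1.symm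
  have h1 : k + 1 - j = (k - j) + 1 := by omega
  rw [h1, List.take_add_one]
  congr 1
  have h3 : (chunk.drop j)[k - j]? = chunk[j + (k - j)]? := List.getElem?_drop
  rw [show j + (k - j) = k by omega] at h3
  rw [h3, List.getElem?_eq_getElem hk, hget]
  rfl

theorem chunkGo_eq_sGo (wl start : Int) (chunk : List Char) :
    ∀ (rem : List Char) (k j : Nat) (base : Int), rem = chunk.drop k → j ≤ k →
    chunkGo wl start chunk rem k j base =
      ((chunk.drop j).take (k - j) ++ (sGo wl rem (start + (k : Int)) base).1,
       (sGo wl rem (start + (k : Int)) base).2) := by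
  intro rem
  induction rem generalizing start with
  | nil =>
    intro k j base hrem hj
    have hlen : chunk.length ≤ k := List.drop_eq_nil_iff.mp hrem.symm
    have h1 : (chunk.drop j).take (k - j) = chunk.drop j := by
      apply List.take_of_length_le
      simp [List.length_drop]; omega
    simp [chunkGo, sGo, h1]
  | cons c rem ih =>
    intro k j base hrem hj
    have hd : chunk.drop (k + 1) = rem := by
      rw [← List.drop_drop, ← hrem]; simp
    have htake := take_succ_of_drop hj hrem.symm
    by_cases hws : pvIsWs c = true
    · rw [chunkGo, sGo]
      simp only [hws, reduceIte]
      rw [ih start (k+1) j (start + (k:Int)) hd.symm (by omega), htake]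
      push_cast
      simp only [List.append_assoc, List.singleton_append]
      simp [add_assoc, add_comm, add_left_comm]
    · by_cases hth : start + (k : Int) - base > wl
      · rw [chunkGo, sGo]
        simp only [hws, hth, reduceIte, Bool.false_eq_true, if_false, if_true]
        rw [ih start (k+1) k (start + (k:Int)) hd.symm (by omega)]
        have h1 : (chunk.drop k).take (k + 1 - k) = [c] := by
          have h2 := take_succ_of_drop (le_refl k) hrem.symm
          simpa using h2
        rw [h1]
        push_cast
        simp only [List.append_assoc, List.singleton_append, List.cons_append]
        simp [add_assoc, add_comm, add_left_comm]
      · rw [chunkGo, sGo]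
        simp only [hws, hth, reduceIte, Bool.false_eq_true, if_false]
        rw [ih start (k+1) j base hd.symm (by omega), htake]
        push_cast
        simp only [List.append_assoc, List.singleton_append]
        simp [add_assoc, add_comm, add_left_comm]

theorem chunkSplit_eq_sGo (chunk : List Char) (start base wl : Int) :
    chunkSplit chunk start base wl = sGo wl chunk start base := by
  have h := chunkGo_eq_sGo wl start chunk chunk 0 0 base (by simp) (le_refl 0)
  simpa [chunkSplit] using h

theorem aGo_text (wl : Int) (txt : List Char) :
    ∀ (cs' : List Char) (i base : Int), '<' ∉ txt →
    aGo wl (txt ++ cs') i base false =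
      (sGo wl txt i base).1 ++ aGo wl cs' (i + txt.length) (sGo wl txt i base).2 false := by
  induction txt with
  | nil => intro cs' i base _; simp [sGo]
  | cons c txt ih =>
    intro cs' i base h
    have hc : ¬ c = '<' := fun e => h (by simp [e])
    have h' : '<' ∉ txt := fun m => h (by simp [m])
    rw [List.cons_append, aGo, sGo]
    by_cases hws : pvIsWs c = true
    · simp only [reduceIte, hc, hws, if_false, if_true]
      rw [ih cs' (i+1) i h']
      simp only [List.length_cons]
      push_cast
      simp [add_assoc, add_comm, add_left_comm]
    · by_cases hth : i - base > wl
      · simp only [reduceIte, hc, hws, hth, Bool.false_eq_true, if_false, if_true]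
        rw [ih cs' (i+1) i h']
        simp only [List.length_cons]
        push_cast
        simp [add_assoc, add_comm, add_left_comm]
      · simp only [reduceIte, hc, hws, hth, Bool.false_eq_true, if_false]
        rw [ih cs' (i+1) base h']
        simp only [List.length_cons]
        push_cast
        simp [add_assoc, add_comm, add_left_comm]

theorem aGo_tag_close (wl : Int) (tg : List Char) :
    ∀ (cs' : List Char) (i base : Int), '>' ∉ tg →
    aGo wl (tg ++ '>' :: cs') i base true =
      tg ++ '>' :: aGo wl cs' (i + tg.length + 1) (i + tg.length) false := by
  induction tg with
  | nil => intro cs' i base _; simp [aGo]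
  | cons c tg ih =>
    intro cs' i base h
    have hc : ¬ c = '>' := fun e => h (by simp [e])
    have h' : '>' ∉ tg := fun m => h (by simp [m])
    rw [List.cons_append, aGo]
    simp only [reduceIte, hc, if_false]
    rw [ih cs' (i+1) base h']
    simp only [List.length_cons, List.cons_append]
    push_cast
    ring_nf

theorem aGo_tag_open (wl : Int) (tg : List Char) :
    ∀ (i base : Int), '>' ∉ tg → aGo wl tg i base true = tg := by
  induction tg with
  | nil => intro i base _; rfl
  | cons c tg ih =>
    intro i base h
    have hc : ¬ c = '>' := fun e => h (by simp [e])
    have h' : '>' ∉ tg := fun m => h (by simp [m])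
    rw [aGo]
    simp only [reduceIte, hc, if_false]
    rw [ih (i+1) base h']
    simp

theorem not_mem_take_findIdx {cs : List Char} {lt : Nat} {ch : Char}
    (h : cs.findIdx? (· = ch) = some lt) : ch ∉ cs.take lt := by
  obtain ⟨hlt, hget, hbef⟩ := List.findIdx?_eq_some_iff_getElem.mp h
  intro hmem
  obtain ⟨j, hj, hje⟩ := List.getElem_of_mem hmem
  have hj' : j < lt := by simp [List.length_take] at hj; omega
  have h2 : (cs.take lt)[j] = cs[j] := List.getElem_take
  exact (hbef j hj') (by simp [← h2, hje])

theorem drop_cons_findIdx {cs : List Char} {lt : Nat} {ch : Char}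
    (h : cs.findIdx? (· = ch) = some lt) : cs.drop lt = ch :: cs.drop (lt + 1) := by
  obtain ⟨hlt, hget, _⟩ := List.findIdx?_eq_some_iff_getElem.mp h
  rw [List.drop_eq_getElem_cons hlt]
  simp only [decide_eq_true_eq] at hget
  rw [hget]

theorem altGo_eq_aGo (wl : Int) :
    ∀ (n : Nat) (cs : List Char), cs.length ≤ n → ∀ (start base : Int),
    altGo wl cs start base = aGo wl cs start base false := by
  intro n
  induction n with
  | zero =>
    intro cs hlen start base
    have h0 : cs = [] := List.length_eq_zero_iff.mp (by omega)
    subst h0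
    rw [altGo]
    simp [aGo, chunkSplit, chunkGo]
  | succ n ih =>
    intro cs hlen start base
    rw [altGo]
    split
    next hfi =>
      have hno : '<' ∉ cs := by
        intro hm
        have h2 := List.findIdx?_eq_none_iff.mp hfi _ hm
        simp at h2
      rw [chunkSplit_eq_sGo]
      have h3 := aGo_text wl cs [] start base hno
      simp only [List.append_nil] at h3
      rw [h3]
      simp [aGo]
    next lt hfi =>
      obtain ⟨hlt, -, -⟩ := List.findIdx?_eq_some_iff_getElem.mp hfi
      have hdec : cs = cs.take lt ++ '<' :: cs.drop (lt + 1) := by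
        conv_lhs => rw [← List.take_append_drop lt cs]
        rw [drop_cons_findIdx hfi]
      have hnot := not_mem_take_findIdx hfi
      have hlen_take : (cs.take lt).length = lt := by
        simp [List.length_take]; omega
      simp only [chunkSplit_eq_sGo]
      cases hfg : (cs.drop (lt + 1)).findIdx? (· = '>') with
      | none =>
        simp only [hfg]
        have hno : '>' ∉ cs.drop (lt + 1) := by
          intro hm
          have h2 := List.findIdx?_eq_none_iff.mp hfg _ hm
          simp at h2
        conv_rhs => rw [hdec]
        rw [aGo_text wl _ _ start base hnot, hlen_take]
        rw [show aGo wl ('<' :: cs.drop (lt+1)) (start + lt) (sGo wl (cs.take lt) start base).2 false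
              = '<' :: aGo wl (cs.drop (lt+1)) (start + lt + 1) (sGo wl (cs.take lt) start base).2 true
            from by rw [aGo]; simp]
        rw [aGo_tag_open wl _ _ _ hno, drop_cons_findIdx hfi]
      | some g =>
        simp only [hfg]
        obtain ⟨hg, -, -⟩ := List.findIdx?_eq_some_iff_getElem.mp hfg
        have hdec2 : cs.drop (lt + 1) = (cs.drop (lt+1)).take g ++ '>' :: (cs.drop (lt+1)).drop (g + 1) := by
          conv_lhs => rw [← List.take_append_drop g (cs.drop (lt+1))]
          rw [drop_cons_findIdx hfg]
        have hnot2 := not_mem_take_findIdx hfg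
        have hg' : g < cs.length - (lt + 1) := by rw [List.length_drop] at hg; omega
        have hlen_take2 : ((cs.drop (lt+1)).take g).length = g := by
          simp [List.length_take]; omega
        have h5 : ((cs.drop (lt+1)).drop (g+1)).length = cs.length - (lt+1) - (g+1) := by
          simp [List.length_drop]; omega
        have hrec := ih ((cs.drop (lt+1)).drop (g+1)) (by omega)
          (start + lt + g + 2) (start + lt + g + 1)
        conv_rhs => rw [hdec]
        rw [aGo_text wl _ _ start base hnot, hlen_take]
        rw [show aGo wl ('<' :: cs.drop (lt+1)) (start + lt) (sGo wl (cs.take lt) start base).2 false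
              = '<' :: aGo wl (cs.drop (lt+1)) (start + lt + 1) (sGo wl (cs.take lt) start base).2 true
            from by rw [aGo]; simp]
        conv_rhs => rw [hdec2]
        rw [aGo_tag_close wl _ _ _ _ hnot2, hlen_take2]
        rw [show start + (lt:Int) + 1 + (g:Int) + 1 = start + (lt:Int) + (g:Int) + 2 from by ring,
            show start + (lt:Int) + 1 + (g:Int) = start + (lt:Int) + (g:Int) + 1 from by ring]
        rw [← hrec]
        have htake : (cs.drop (lt+1)).take (g+1) = (cs.drop (lt+1)).take g ++ ['>'] := by
          obtain ⟨hgl, hgc, -⟩ := List.findIdx?_eq_some_iff_getElem.mp hfg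
          simp only [decide_eq_true_eq] at hgc
          rw [List.take_add_one, List.getElem?_eq_getElem hg]
          rw [show (cs.drop (lt+1))[g] = '>' from hgc]
          rfl
        rw [htake]
        simp [add_assoc, add_comm, add_left_comm]

-- ===== VERDICT (by name: the statement is the Claim_ definition above) =====
theorem splitlongwords_spec : Claim_equal_splitlongwords := by
  intro x wl _
  unfold Spec_splitlongwords splitlongwords splitlongwords_alt
  rw [altGo_eq_aGo wl x.toList.length x.toList (le_refl _)]
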